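-- pv_equiv track=rewrite | github.com/genji0306/Opensens-Parallax | Supporting/platform/OSSR/backend/app/services/ais/paper_orchestra_service.py | _best_insertion_point
-- ===== SOURCE A (Python) =====
-- def _best_insertion_point(section_names: list[str], focus: str) -> str:
--     lowered_focus = focus.lower()
--     for name in section_names:
--         if "related" in name.lower() or "introduction" in name.lower():
--             return name
--     if "method" in lowered_focus:
--         for name in section_names:
--             if "method" in name.lower():
--                 return name
--     return section_names[0] if section_names else "Introduction"
-- ===== SOURCE B (Python) =====
-- def _best_insertion_point(section_names: list[str], focus: str) -> str:
--     lowered_focus = focus.lower()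
--     method_candidate = None
--     for name in section_names:
--         lowered = name.lower()
--         if "related" in lowered or "introduction" in lowered:
--             return name
--         if method_candidate is None and "method" in lowered:
--             method_candidate = name
--     if "method" in lowered_focus and method_candidate is not None:
--         return method_candidate
--     return section_names[0] if section_names else "Introduction"
-- ===== Notes on version B (the rewrite author's own statement) =====
-- stated objective: alternative
-- what changed: Replaces A's two separate scans of section_names with a single pass that returns on a related/introduction hit and remembers the first method-containing name for the post-loop decision.
import Mathlib
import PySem

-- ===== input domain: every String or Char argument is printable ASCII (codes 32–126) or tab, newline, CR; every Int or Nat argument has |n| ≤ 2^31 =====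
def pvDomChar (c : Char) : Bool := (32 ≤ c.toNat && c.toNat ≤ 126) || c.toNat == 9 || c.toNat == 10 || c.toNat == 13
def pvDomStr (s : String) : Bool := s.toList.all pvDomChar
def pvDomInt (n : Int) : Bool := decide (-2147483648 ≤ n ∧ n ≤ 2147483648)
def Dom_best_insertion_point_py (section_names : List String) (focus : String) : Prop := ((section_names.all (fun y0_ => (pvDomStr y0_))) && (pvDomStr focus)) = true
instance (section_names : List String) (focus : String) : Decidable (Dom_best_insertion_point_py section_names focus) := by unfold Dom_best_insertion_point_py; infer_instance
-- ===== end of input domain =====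

-- B merges A's two scans into a single pass that remembers the first method-containing name; alternative decomposition, same behaviour.


-- ===== PORT A =====
-- first loop of A: first name whose lowercase contains "related" or "introduction"
def bipFindRI : List String → Option String
  | [] => none
  | n :: rest =>
    if PySem.Str.isIn "related" (PySem.Str.lower n) || PySem.Str.isIn "introduction" (PySem.Str.lower n)
    then some n else bipFindRI rest

-- second loop of A: first name whose lowercase contains "method"
def bipFindMethod : List String → Option String
  | [] => none
  | n :: rest =>
    if PySem.Str.isIn "method" (PySem.Str.lower n) then some n else bipFindMethod rest

def best_insertion_point_py (section_names : List String) (focus : String) : String :=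
  let lowered_focus := PySem.Str.lower focus
  match bipFindRI section_names with
  | some n => n
  | none =>
    if PySem.Str.isIn "method" lowered_focus then
      match bipFindMethod section_names with
      | some n => n
      | none => match section_names with | [] => "Introduction" | h :: _ => h
    else match section_names with | [] => "Introduction" | h :: _ => h

-- ===== PORT B =====
-- single pass: early return on related/introduction, remember first method candidate
def bipScan (lf : String) (fallback : String) : List String → Option String → String
  | [], cand =>
    if PySem.Str.isIn "method" lf && cand.isSome then cand.getD fallback else fallback
  | n :: rest, cand =>
    let ln := PySem.Str.lower n
    if PySem.Str.isIn "related" ln || PySem.Str.isIn "introduction" ln then n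
    else bipScan lf fallback rest
      (if cand.isNone && PySem.Str.isIn "method" ln then some n else cand)

def best_insertion_point_py_alt (section_names : List String) (focus : String) : String :=
  bipScan (PySem.Str.lower focus)
    (match section_names with | [] => "Introduction" | h :: _ => h)
    section_names none

-- ===== PRECONDITION & SPEC =====
def Spec_best_insertion_point_py (section_names : List String) (focus : String) (out : String) : Prop := out = best_insertion_point_py_alt section_names focus
instance (section_names : List String) (focus : String) (out : String) : Decidable (Spec_best_insertion_point_py section_names focus out) := by unfold Spec_best_insertion_point_py; infer_instance

-- ===== CLAIM (what is proved, stated in full; the proofs are below) =====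
def Claim_equal_best_insertion_point_py : Prop := ∀ (section_names : List String) (focus : String), Dom_best_insertion_point_py section_names focus → Spec_best_insertion_point_py section_names focus (best_insertion_point_py section_names focus)

-- ===== LEMMAS AND PROOFS =====

-- the single pass equals: related/intro hit, else the pending candidate or A's method scan, else fallback
theorem bipScan_eq (lf fallback : String) (l : List String) (cand : Option String) :
    bipScan lf fallback l cand =
      match bipFindRI l with
      | some n => n
      | none =>
        if PySem.Str.isIn "method" lf then
          ((cand.orElse (fun _ => bipFindMethod l)).getD fallback)
        else fallback := by
  induction l generalizing cand with
  | nil =>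
    simp only [bipScan, bipFindRI, bipFindMethod]
    cases cand <;> cases hm : PySem.Str.isIn "method" lf <;>
      simp [hm, Option.orElse]
  | cons n rest ih =>
    simp only [bipScan, bipFindRI, bipFindMethod]
    cases h1 : (PySem.Str.isIn "related" (PySem.Str.lower n) || PySem.Str.isIn "introduction" (PySem.Str.lower n)) with
    | true => simp only [h1, if_true]
    | false =>
      simp only [h1, Bool.false_eq_true, if_false, ih]
      cases cand with
      | some c => simp [Option.orElse]
      | none =>
        cases h2 : PySem.Str.isIn "method" (PySem.Str.lower n) <;>
          simp [Option.orElse]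

theorem best_insertion_point_py_spec : Claim_equal_best_insertion_point_py := by
  intro sn focus _
  unfold Spec_best_insertion_point_py best_insertion_point_py best_insertion_point_py_alt
  rw [bipScan_eq]
  cases h : bipFindRI sn with
  | some n => rfl
  | none =>
    simp only [h]
    cases hm : PySem.Str.isIn "method" (PySem.Str.lower focus) with
    | false => simp only [hm, Bool.false_eq_true, if_false]
    | true =>
      simp only [hm, if_true]
      cases h2 : bipFindMethod sn <;> simp [h2, Option.orElse]
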